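-- pv_equiv track=rewrite | github.com/qlitre/pysimple-wordle-solver | solver_gui.py | get_optimize_words
-- ===== SOURCE A (Python) =====
-- def get_optimize_words(words: list):
--     """黄色のヒット率が高い単語順に並べて返す"""
--     optimized_words = []
--     # 単語を総当たりで調べて、黄色がヒットするか調べる
--     for guess in words:
--         cnt = 0
--         for answer in words:
--             # 同じ場合は除く
--             if guess == answer:
--                 continue
--             # 同じ文字はカウントしない
--             already = []
--             for c in guess:
--                 if c in already:
--                     continue
--                 already.append(c)
--                 # 含まれていたらカウントアップ
--                 if c in answer:
--                     cnt += 1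
--         optimized_words.append({'word': guess, 'yellow_count': cnt})
--     # ヒット降順で並べる
--     optimized_words.sort(key=lambda x: -x['yellow_count'])
--
--     return [f"{dic['word']}:{dic['yellow_count']}" for dic in optimized_words]
-- ===== SOURCE B (Python) =====
-- def get_optimize_words(words: list):
--     """黄色のヒット率が高い単語順に並べて返す (single pass over per-letter containment counts)"""
--     # contains[c] = number of words that contain the letter c; mult[w] = multiplicity of w
--     contains = {}
--     for c in (c for w in words for c in dict.fromkeys(w)):
--         contains[c] = contains.get(c, 0) + 1
--     mult = {}
--     for w in words:
--         mult[w] = mult.get(w, 0) + 1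
--     # for each unique letter c of a guess, every word containing c scores a hit,
--     # except the mult[w] copies of the guess itself (A skips answers equal to the guess)
--     scored = [(w, sum(contains.get(c, 0) - mult.get(w, 0) for c in dict.fromkeys(w)))
--               for w in words]
--     scored.sort(key=lambda t: -t[1])
--     return [f"{w}:{c}" for w, c in scored]
-- ===== Notes on version B (the rewrite author's own statement) =====
-- stated objective: faster
-- what changed: Replaces the all-pairs guess×answer scan with per-letter containment counts built in one pass: each guess's yellow count is the sum over its distinct letters c of (number of words containing c) minus its own multiplicity.
import Mathlib
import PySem

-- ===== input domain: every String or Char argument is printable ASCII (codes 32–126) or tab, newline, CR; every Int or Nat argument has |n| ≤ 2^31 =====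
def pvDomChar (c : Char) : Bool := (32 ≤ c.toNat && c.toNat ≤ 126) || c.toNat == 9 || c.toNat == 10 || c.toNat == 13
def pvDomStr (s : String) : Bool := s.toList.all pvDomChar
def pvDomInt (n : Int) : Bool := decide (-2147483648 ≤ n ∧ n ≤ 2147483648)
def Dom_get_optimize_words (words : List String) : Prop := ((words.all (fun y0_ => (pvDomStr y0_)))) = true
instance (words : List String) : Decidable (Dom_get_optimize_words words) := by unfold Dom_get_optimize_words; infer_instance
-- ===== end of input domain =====

-- B replaces A's O(N²·L) all-pairs scan by per-letter containment counts summed per guess (O(N·L)); a timing run measured the speed-up.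

-- ===== PORT A =====
-- inner 'for c in guess' loop: state = (already, cnt)
def pvA_scanChar (answer : List Char) (st : List Char × Int) (c : Char) : List Char × Int :=
  if c ∈ st.1 then st
  else (st.1 ++ [c], if c ∈ answer then st.2 + 1 else st.2)

-- the 'for answer in words' loop computing cnt for one guess
def pvA_cnt (words : List String) (guess : String) : Int :=
  words.foldl (fun cnt answer =>
    if guess == answer then cnt
    else (guess.toList.foldl (pvA_scanChar answer.toList) ([], cnt)).2) 0

def get_optimize_words (words : List String) : List String :=
  let optimized : List (String × Int) :=
    words.foldl (fun acc guess => acc ++ [(guess, pvA_cnt words guess)]) []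
  let sortedW := PySem.List.sorted optimized (fun t => -t.2) false
  sortedW.map (fun t => String.ofList (t.1.toList ++ ':' :: PySem.Int.toChars t.2))

-- ===== PORT B =====
-- all letters, one copy per (word, distinct letter) pair
def pvB_letters (words : List String) : List Char :=
  words.flatMap (fun w => PySem.List.dedup w.toList)

def get_optimize_words_alt (words : List String) : List String :=
  let contains := (pvB_letters words).foldl (fun d c => d.insert c (d.getD c 0 + 1)) PySem.Dict.empty
  let mult := words.foldl (fun d w => d.insert w (d.getD w 0 + 1)) PySem.Dict.empty
  let scored : List (String × Int) :=
    words.map (fun w =>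
      (w, ((PySem.List.dedup w.toList).map (fun c => contains.getD c 0 - mult.getD w 0)).sum))
  let sortedW := PySem.List.sorted scored (fun t => -t.2) false
  sortedW.map (fun t => String.ofList (t.1.toList ++ ':' :: PySem.Int.toChars t.2))

-- ===== PRECONDITION & SPEC =====
def Spec_get_optimize_words (words : List String) (out : List String) : Prop := out = get_optimize_words_alt words
instance (words : List String) (out : List String) : Decidable (Spec_get_optimize_words words out) := by unfold Spec_get_optimize_words; infer_instance

-- ===== CLAIM (what is proved, stated in full; the proofs are below) =====
def Claim_equal_get_optimize_words : Prop := ∀ (words : List String), Dom_get_optimize_words words → Spec_get_optimize_words words (get_optimize_words words)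

-- ===== LEMMAS AND PROOFS =====

-- the characters of l that are new relative to the accumulator al, in order
def pvNew (al l : List Char) : List Char :=
  match l with
  | [] => []
  | c :: t => if c ∈ al then pvNew al t else c :: pvNew (al ++ [c]) t

lemma addFold_eq (l al : List Char) :
    l.foldl PySem.Set.add al = al ++ pvNew al l := by
  induction l generalizing al with
  | nil => simp [pvNew]
  | cons c t ih =>
    simp only [List.foldl_cons, pvNew, PySem.Set.add]
    by_cases hc : c ∈ al
    · simp [hc, ih]
    · simp [hc, ih (al ++ [c])]

lemma dedup_eq_pvNew (l : List Char) : PySem.List.dedup l = pvNew [] l := by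
  simpa using addFold_eq l []

lemma scan_spec (answer : List Char) (l : List Char) : ∀ (al : List Char) (cnt : Int),
    (l.foldl (pvA_scanChar answer) (al, cnt)).2
      = cnt + ((pvNew al l).countP (fun c => decide (c ∈ answer)) : Int) := by
  induction l with
  | nil => intro al cnt; simp [pvNew]
  | cons c t ih =>
    intro al cnt
    simp only [List.foldl_cons, pvA_scanChar, pvNew]
    by_cases hc : c ∈ al
    · simp [hc, ih]
    · by_cases ha : c ∈ answer
      · simp [hc, ha, ih]; ring
      · simp [hc, ha, ih]

lemma countP_int (p : Char → Bool) (U : List Char) :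
    ((U.countP p : Nat) : Int) = (U.map (fun c => if p c then (1 : Int) else 0)).sum := by
  induction U with
  | nil => simp
  | cons c t ih => simp [List.countP_cons, ih]; by_cases h : p c <;> simp [h]; ring

-- the heart of the equivalence: the all-pairs sum equals the per-letter count sum
lemma main_sum (g : String) (U : List Char)
    (hU : ∀ c ∈ U, c ∈ g.toList) (ws : List String) :
    (ws.map (fun w => if g == w then (0 : Int)
        else (U.countP (fun c => decide (c ∈ w.toList)) : Int))).sum
      = (U.map (fun c => ((pvB_letters ws).count c : Int) - (ws.count g : Int))).sum := by
  induction ws with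
  | nil => simp [pvB_letters]
  | cons w t ih =>
    have hsplit : ∀ c : Char, ((pvB_letters (w :: t)).count c : Int)
        = ((PySem.List.dedup w.toList).count c : Int) + ((pvB_letters t).count c : Int) := by
      intro c
      simp [pvB_letters, List.count_append]
    have hcnt : ∀ c : Char, ((PySem.List.dedup w.toList).count c : Int)
        = if c ∈ w.toList then (1 : Int) else 0 := by
      intro c
      by_cases hm : c ∈ w.toList
      · rw [List.count_eq_one_of_mem (PySem.List.nodup_dedup _) ((PySem.List.mem_dedup _ _).mpr hm)]
        simp [hm]
      · rw [List.count_eq_zero_of_not_mem (fun h => hm ((PySem.List.mem_dedup _ _).mp h))]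
        simp [hm]
    have hmul : ((w :: t).count g : Int) = (if w == g then (1 : Int) else 0) + (t.count g : Int) := by
      rw [List.count_cons]; by_cases h : w == g <;> simp [h, add_comm]
    have step : (U.map (fun c => ((pvB_letters (w :: t)).count c : Int) - ((w :: t).count g : Int))).sum
        = (U.map (fun c => (if c ∈ w.toList then (1 : Int) else 0) - (if w == g then (1 : Int) else 0))).sum
          + (U.map (fun c => ((pvB_letters t).count c : Int) - (t.count g : Int))).sum := by
      rw [← List.sum_map_add]
      congr 1
      apply List.map_congr_left
      intro c _
      rw [hsplit, hcnt, hmul]; ring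
    rw [List.map_cons, List.sum_cons, step, ← ih]
    congr 1
    by_cases hgw : g = w
    · subst hgw
      simp only [BEq.rfl, if_true]
      symm
      apply List.sum_eq_zero
      intro x hx
      simp only [List.mem_map] at hx
      obtain ⟨c, hc, rfl⟩ := hx
      simp [hU c hc]
    · have hb : (g == w) = false := by simp [hgw]
      have hb' : (w == g) = false := by simp [Ne.symm hgw]
      rw [countP_int]
      simp only [hb, hb', Bool.false_eq_true, if_false, sub_zero]
      congr 1
      apply List.map_congr_left
      intro c _
      simp

lemma cnt_eq (words : List String) (g : String) :
    pvA_cnt words g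
      = ((PySem.List.dedup g.toList).map
          (fun c => ((pvB_letters words).count c : Int) - (words.count g : Int))).sum := by
  unfold pvA_cnt
  have hstep : ∀ (cnt : Int) (answer : String),
      (if g == answer then cnt
        else (g.toList.foldl (pvA_scanChar answer.toList) ([], cnt)).2)
      = cnt + (if g == answer then (0 : Int)
        else ((pvNew [] g.toList).countP (fun c => decide (c ∈ answer.toList)) : Int)) := by
    intro cnt answer
    by_cases h : g == answer
    · simp [h]
    · simp only [h, Bool.false_eq_true, if_false]
      rw [scan_spec]
  calc words.foldl (fun cnt answer =>
        if g == answer then cnt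
        else (g.toList.foldl (pvA_scanChar answer.toList) ([], cnt)).2) 0
      = words.foldl (fun cnt answer => cnt + (if g == answer then (0 : Int)
          else ((pvNew [] g.toList).countP (fun c => decide (c ∈ answer.toList)) : Int))) 0 := by
        apply PySem.List.foldl_congr_mem
        intro acc x _
        exact hstep acc x
    _ = (words.map (fun answer => if g == answer then (0 : Int)
          else ((pvNew [] g.toList).countP (fun c => decide (c ∈ answer.toList)) : Int))).sum := by
        rw [PySem.List.foldl_add]; simp
    _ = _ := by
        rw [← dedup_eq_pvNew]
        exact main_sum g (PySem.List.dedup g.toList)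
          (fun c hc => (PySem.List.mem_dedup _ _).mp hc) words

-- ===== VERDICT (by name: the statement is the Claim_ definition above) =====
theorem get_optimize_words_spec : Claim_equal_get_optimize_words := by
  intro words _
  unfold Spec_get_optimize_words get_optimize_words get_optimize_words_alt
  rw [PySem.Dict.foldl_insert_getD_add_one_eq_counter, PySem.Dict.foldl_insert_getD_add_one_eq_counter,
    PySem.List.foldl_append_singleton_eq_map]
  simp only [List.nil_append]
  congr 1
  congr 1
  apply List.map_congr_left
  intro g _
  rw [cnt_eq]
  congr 1
  congr 1
  apply List.map_congr_left
  intro c _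
  rw [PySem.Dict.getD_counter, PySem.Dict.getD_counter]
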